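-- pv_equiv track=rewrite | github.com/ratiertm/hwpx-skill | pyhwpxlib/hwp2hwpx.py | _preprocess_tab_fills
-- ===== SOURCE A (Python) =====
-- from typing import Any, Dict, List, Optional, Tuple
--
-- _CH_TAB = 9
--
-- _CH_FWSPACE = 31
--
-- _CH_TAB_FILL_SENTINEL = 0x0001  # a low control code safely unused elsewhere
--
-- def _preprocess_tab_fills(chars: List[Tuple[int, int]]) -> List[Tuple[int, int]]:
--     """Preprocess HWP tab-fill sequences.
--
--     HWP pattern: TAB + fill_char(>=0x20 or fwSpace=0x1F) + NULL(0x0000) + ... + closing_TAB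
--     → SENTINEL + TAB
--
--     The SENTINEL signals _flush_run to emit leader="3" (DASH) on the TAB.
--     Fill characters and the closing TAB are all dropped because the owpml
--     format uses a single <hp:tab leader="3" type="2"/> with no fill chars.
--     """
--     result: List[Tuple[int, int]] = []
--     i = 0
--     while i < len(chars):
--         pos_i, ch_i = chars[i]
--         if (ch_i == _CH_TAB
--                 and i + 1 < len(chars)
--                 and (chars[i + 1][1] >= 0x0020 or chars[i + 1][1] == _CH_FWSPACE)
--                 and i + 2 < len(chars)
--                 and chars[i + 2][1] == 0x0000):
--             # Opening fill TAB: emit SENTINEL then TAB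
--             result.append((pos_i, _CH_TAB_FILL_SENTINEL))
--             result.append((pos_i, _CH_TAB))
--             i += 1  # skip opening TAB (already emitted)
--             # Skip all fill chars until closing TAB
--             while i < len(chars) and chars[i][1] != _CH_TAB:
--                 i += 1
--             if i < len(chars):
--                 i += 1  # skip closing TAB too
--         else:
--             result.append((pos_i, ch_i))
--             i += 1
--     return result
-- ===== SOURCE B (Python) =====
-- from typing import List, Tuple
--
-- _CH_TAB = 9
-- _CH_FWSPACE = 31
-- _CH_TAB_FILL_SENTINEL = 0x0001
--
--
-- def _find_tab(seq):
--     """Index of the first TAB character in seq, or None."""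
--     for j, (_, c) in enumerate(seq):
--         if c == _CH_TAB:
--             return j
--     return None
--
--
-- def _split_at_tab(seq):
--     """Split seq into (segment before the first TAB, rest starting at that TAB)."""
--     j = _find_tab(seq)
--     if j is None:
--         return seq, []
--     return seq[:j], seq[j:]
--
--
-- def _preprocess_tab_fills(chars: List[Tuple[int, int]]) -> List[Tuple[int, int]]:
--     """Process the stream TAB-by-TAB: repeatedly split at the next TAB and
--     handle whole segments, instead of a per-character index scan."""
--     result: List[Tuple[int, int]] = []
--     rest = chars
--     while True:
--         pre, rest = _split_at_tab(rest)
--         result += pre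
--         if not rest:
--             return result
--         head, after = rest[0], rest[1:]
--         if (len(after) >= 2
--                 and (after[0][1] >= 0x20 or after[0][1] == _CH_FWSPACE)
--                 and after[1][1] == 0x0000):
--             # fill run: emit SENTINEL + TAB, drop everything through the closing TAB
--             result += [(head[0], _CH_TAB_FILL_SENTINEL), (head[0], _CH_TAB)]
--             rest = _split_at_tab(after)[1][1:]
--         else:
--             result.append(head)
--             rest = after
-- ===== Notes on version B (the rewrite author's own statement) =====
-- stated objective: alternative
-- what changed: Instead of a per-character index scan with a nested inner while, B processes the stream TAB-by-TAB: a split helper cuts the list at the next TAB, non-TAB segments are appended wholesale, and a matched fill run is skipped by one further split.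
import Mathlib
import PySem

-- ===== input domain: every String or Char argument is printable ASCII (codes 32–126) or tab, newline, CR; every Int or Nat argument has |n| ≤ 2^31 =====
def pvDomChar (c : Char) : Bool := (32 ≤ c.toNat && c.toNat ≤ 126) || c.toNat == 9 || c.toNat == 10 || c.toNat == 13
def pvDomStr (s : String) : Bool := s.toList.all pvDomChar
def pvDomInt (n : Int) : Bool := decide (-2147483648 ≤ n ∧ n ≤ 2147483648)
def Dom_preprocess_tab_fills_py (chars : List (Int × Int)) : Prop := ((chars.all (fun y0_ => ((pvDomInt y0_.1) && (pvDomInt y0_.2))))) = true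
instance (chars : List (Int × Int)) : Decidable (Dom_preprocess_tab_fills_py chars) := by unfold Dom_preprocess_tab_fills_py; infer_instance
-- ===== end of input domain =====

-- B replaces the per-character scan with nested skip loop by a TAB-by-TAB segment splitter; objective: alternative decomposition.

-- ===== PORT A =====
-- inner `while i < len(chars) and chars[i][1] != TAB: i += 1`
def aSkip (chars : List (Int × Int)) (i : Nat) : Nat :=
  if _h : i < chars.length then
    if chars[i].2 ≠ 9 then aSkip chars (i + 1) else i
  else i
termination_by chars.length - i

theorem aSkip_ge (chars : List (Int × Int)) (i : Nat) : i ≤ aSkip chars i := by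
  fun_induction aSkip chars i with
  | case1 => omega
  | case2 => omega
  | case3 => omega

-- the multi-line fill-pattern condition of A's outer if (chars[i+1], chars[i+2] via pyGet?)
def aFillCond (chars : List (Int × Int)) (ch_i : Int) (i : Nat) : Bool :=
  ch_i = 9 ∧ i + 1 < chars.length ∧
    (32 ≤ ((PySem.List.pyGet? chars ((i : Int) + 1)).getD (0, 0)).2 ∨
      ((PySem.List.pyGet? chars ((i : Int) + 1)).getD (0, 0)).2 = 31) ∧
    i + 2 < chars.length ∧ ((PySem.List.pyGet? chars ((i : Int) + 2)).getD (0, 0)).2 = 0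

-- outer while loop of A, state = (result, i)
def aLoop (chars : List (Int × Int)) (result : List (Int × Int)) (i : Nat) : List (Int × Int) :=
  if h : i < chars.length then
    let pc := chars[i]
    if aFillCond chars pc.2 i then
      aLoop chars ((result ++ [(pc.1, 1)]) ++ [(pc.1, 9)])
        (if aSkip chars (i + 1) < chars.length then aSkip chars (i + 1) + 1 else aSkip chars (i + 1))
    else
      aLoop chars (result ++ [(pc.1, pc.2)]) (i + 1)
  else result
termination_by chars.length - i
decreasing_by
  · have := aSkip_ge chars (i + 1); split <;> omega
  · omega

def preprocess_tab_fills_py (chars : List (Int × Int)) : List (Int × Int) :=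
  aLoop chars [] 0

-- ===== PORT B =====
-- `_find_tab`: index of first TAB, scanning with a counter
def bFindTab : List (Int × Int) → Nat → Option Nat
  | [], _ => none
  | (_, c) :: t, j => if c = 9 then some j else bFindTab t (j + 1)

-- `_split_at_tab`: seq[:j], seq[j:] with 0 ≤ j ≤ len are exactly take/drop
def bSplit (seq : List (Int × Int)) : List (Int × Int) × List (Int × Int) :=
  match bFindTab seq 0 with
  | none => (seq, [])
  | some j => (seq.take j, seq.drop j)

theorem bSplit_snd_len (seq : List (Int × Int)) : (bSplit seq).2.length ≤ seq.length := by
  unfold bSplit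
  cases bFindTab seq 0 <;> simp

-- the `while True` loop of B, state = (result, rest)
def bLoop (result rest : List (Int × Int)) : List (Int × Int) :=
  let pre := (bSplit rest).1
  let r := (bSplit rest).2
  if hr : r = [] then result ++ pre
  else
    let head := r.headD (0, 0)
    let after := r.tail
    if (2 ≤ after.length ∧
        (32 ≤ (after.headD (0, 0)).2 ∨ (after.headD (0, 0)).2 = 31) ∧
        (after.getD 1 (0, 0)).2 = 0 : Prop) then
      bLoop ((result ++ pre) ++ [(head.1, 1), (head.1, 9)]) ((bSplit after).2.drop 1)
    else
      bLoop ((result ++ pre) ++ [head]) after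
termination_by rest.length
decreasing_by
  · have h1 := bSplit_snd_len rest
    have h2 := bSplit_snd_len ((bSplit rest).2.tail)
    have hlt : (bSplit rest).2.tail.length < (bSplit rest).2.length := by
      cases hc : (bSplit rest).2 with
      | nil => exact absurd hc hr
      | cons a t => simp only [List.tail_cons, List.length_cons]; omega
    simp only [List.length_drop]; omega
  · have h1 := bSplit_snd_len rest
    have hlt : (bSplit rest).2.tail.length < (bSplit rest).2.length := by
      cases hc : (bSplit rest).2 with
      | nil => exact absurd hc hr
      | cons a t => simp only [List.tail_cons, List.length_cons]; omega
    omega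

def preprocess_tab_fills_py_alt (chars : List (Int × Int)) : List (Int × Int) :=
  bLoop [] chars

-- ===== PRECONDITION & SPEC =====
def Spec_preprocess_tab_fills_py (chars : List (Int × Int)) (out : List (Int × Int)) : Prop := out = preprocess_tab_fills_py_alt chars
instance (chars : List (Int × Int)) (out : List (Int × Int)) : Decidable (Spec_preprocess_tab_fills_py chars out) := by unfold Spec_preprocess_tab_fills_py; infer_instance

-- ===== CLAIM (what is proved, stated in full; the proofs are below) =====
def Claim_equal_preprocess_tab_fills_py : Prop := ∀ (chars : List (Int × Int)), Dom_preprocess_tab_fills_py chars → Spec_preprocess_tab_fills_py chars (preprocess_tab_fills_py chars)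

-- ===== LEMMAS AND PROOFS =====

-- proof-only intermediary: a flag-state machine both loops are shown to compute
def gFillAhead : List (Int × Int) → Bool
  | (_, c1) :: (_, c2) :: _ => ((32 ≤ c1 ∨ c1 = 31) ∧ c2 = 0 : Bool)
  | _ => false

def gGo (skipping : Bool) : List (Int × Int) → List (Int × Int)
  | [] => []
  | (p, c) :: rest =>
    if skipping then
      if c = 9 then gGo false rest else gGo true rest
    else
      if c = 9 ∧ gFillAhead rest then
        (p, 1) :: (p, 9) :: gGo true rest
      else
        (p, c) :: gGo false rest

-- ---- A = gGo (invariant over A's index loop) ----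

def skipTarget (chars : List (Int × Int)) (i : Nat) : Nat :=
  if aSkip chars i < chars.length then aSkip chars i + 1 else aSkip chars i

theorem aLoop_stop (chars res : List (Int × Int)) (i : Nat) (h : ¬ i < chars.length) :
    aLoop chars res i = res := by
  unfold aLoop; simp [h]

theorem gFillAhead_short (l : List (Int × Int)) (h : l.length ≤ 1) : gFillAhead l = false := by
  match l, h with
  | [], _ => rfl
  | [x], _ => rfl

theorem aSkip_stop (chars : List (Int × Int)) (i : Nat) (h : ¬ i < chars.length) :
    aSkip chars i = i := by
  unfold aSkip; simp [h]

theorem both_stop (chars : List (Int × Int)) (i : Nat) (h : ¬ i < chars.length)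
    (res : List (Int × Int)) :
      (aLoop chars res i = res ++ gGo false (chars.drop i)) ∧
      (aLoop chars res (skipTarget chars i) = res ++ gGo true (chars.drop i)) := by
  have hd : chars.drop i = [] := List.drop_eq_nil_of_le (by omega)
  have hsk : skipTarget chars i = i := by
    unfold skipTarget; rw [aSkip_stop chars i h]; simp [h]
  rw [hsk, hd]
  simp [aLoop_stop chars res i h, gGo]

theorem both_invariant (chars : List (Int × Int)) :
    ∀ n i, chars.length - i ≤ n → ∀ res,
      (aLoop chars res i = res ++ gGo false (chars.drop i)) ∧
      (aLoop chars res (skipTarget chars i) = res ++ gGo true (chars.drop i)) := by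
  intro n
  induction n with
  | zero =>
    intro i hi res
    exact both_stop chars i (by omega) res
  | succ n ih =>
    intro i hi res
    by_cases h : i < chars.length
    · have hdrop : chars.drop i = chars[i] :: chars.drop (i + 1) :=
        List.drop_eq_getElem_cons h
      constructor
      · -- main conjunct
        have hA : aLoop chars res i =
            if aFillCond chars chars[i].2 i then
              aLoop chars ((res ++ [(chars[i].1, 1)]) ++ [(chars[i].1, 9)])
                (skipTarget chars (i + 1))
            else
              aLoop chars (res ++ [(chars[i].1, chars[i].2)]) (i + 1) := by
          rw [aLoop]; simp only [dif_pos h]; rfl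
        have hcond : (aFillCond chars chars[i].2 i = true)
              ↔ (chars[i].2 = 9 ∧ gFillAhead (chars.drop (i + 1)) = true) := by
          by_cases h2 : i + 2 < chars.length
          · have h1 : i + 1 < chars.length := by omega
            have hd1 : chars.drop (i + 1) = chars[i+1] :: chars.drop (i + 2) :=
              List.drop_eq_getElem_cons h1
            have hd2 : chars.drop (i + 2) = chars[i+2] :: chars.drop (i + 3) :=
              List.drop_eq_getElem_cons h2
            have hg1 : (PySem.List.pyGet? chars ((i : Int) + 1)).getD (0, 0) = chars[i+1] := by
              have : ((i : Int) + 1) = ((i + 1 : Nat) : Int) := by push_cast; ring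
              rw [this, PySem.List.pyGet?_natCast, List.getElem?_eq_getElem h1]; rfl
            have hg2 : (PySem.List.pyGet? chars ((i : Int) + 2)).getD (0, 0) = chars[i+2] := by
              have : ((i : Int) + 2) = ((i + 2 : Nat) : Int) := by push_cast; ring
              rw [this, PySem.List.pyGet?_natCast, List.getElem?_eq_getElem h2]; rfl
            unfold aFillCond
            rw [hd1, hd2, hg1, hg2]
            cases hc1 : chars[i+1] with
            | mk p1 c1 =>
              cases hc2 : chars[i+2] with
              | mk p2 c2 =>
                simp [gFillAhead, h1, h2]
          · have hshort : gFillAhead (chars.drop (i + 1)) = false := by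
              apply gFillAhead_short
              simp [List.length_drop]; omega
            unfold aFillCond
            simp [hshort]
            intro _ _ _ h2'
            omega
        rw [hA, hdrop]
        by_cases hc : chars[i].2 = 9 ∧ gFillAhead (chars.drop (i + 1)) = true
        · rw [if_pos (hcond.mpr hc)]
          have := (ih (i + 1) (by omega) ((res ++ [(chars[i].1, 1)]) ++ [(chars[i].1, 9)])).2
          rw [this]
          cases hci : chars[i] with
          | mk p c =>
            have hc9 : c = 9 := by rw [hci] at hc; exact hc.1
            have hfa : gFillAhead (chars.drop (i + 1)) = true := hc.2
            simp [gGo, hc9, hfa]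
        · rw [if_neg (fun hx => hc (hcond.mp hx))]
          have := (ih (i + 1) (by omega) (res ++ [(chars[i].1, chars[i].2)])).1
          rw [this]
          cases hci : chars[i] with
          | mk p c =>
            rw [hci] at hc
            by_cases hc9 : c = 9
            · have hfa : gFillAhead (chars.drop (i + 1)) = false := by
                rcases Bool.eq_false_or_eq_true (gFillAhead (chars.drop (i + 1))) with hf | ht
                · exact absurd ⟨hc9, hf⟩ hc
                · exact ht
              simp [gGo, hc9, hfa]
            · simp [gGo, hc9]
      · -- skipping conjunct
        have hu : aSkip chars i = if chars[i].2 ≠ 9 then aSkip chars (i + 1) else i := by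
          rw [aSkip]; simp only [dif_pos h]
        cases hci : chars[i] with
        | mk p c =>
          by_cases hc9 : c = 9
          · have hsk : skipTarget chars i = i + 1 := by
              unfold skipTarget
              rw [hu, hci]
              simp [hc9, h]
            rw [hsk, hdrop, hci]
            have := (ih (i + 1) (by omega) res).1
            rw [this]
            simp [gGo, hc9]
          · have hsk : skipTarget chars i = skipTarget chars (i + 1) := by
              unfold skipTarget
              rw [hu, hci]
              simp [hc9]
            rw [hsk, hdrop, hci]
            have := (ih (i + 1) (by omega) res).2
            rw [this]
            simp [gGo, hc9]
    · exact both_stop chars i h res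

-- ---- bSplit = takeWhile / dropWhile at the first TAB ----

theorem bFindTab_shift (t : List (Int × Int)) :
    ∀ j, bFindTab t (j + 1) = (bFindTab t j).map (· + 1) := by
  induction t with
  | nil => intro j; rfl
  | cons a t ih =>
    intro j
    cases a with
    | mk p c =>
      by_cases hc : c = 9
      · simp [bFindTab, hc]
      · simp [bFindTab, hc, ih]

theorem bSplit_eq (seq : List (Int × Int)) :
    bSplit seq = (seq.takeWhile (fun x => x.2 != 9), seq.dropWhile (fun x => x.2 != 9)) := by
  induction seq with
  | nil => rfl
  | cons a t ih =>
    cases a with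
    | mk p c =>
      by_cases hc : c = 9
      · simp [bSplit, bFindTab, hc, List.takeWhile, List.dropWhile]
      · have hb : (c != 9) = true := by simp [hc]
        have hf : bFindTab ((p, c) :: t) 0 = (bFindTab t 0).map (· + 1) := by
          simp [bFindTab, hc, bFindTab_shift]
        have ih1 := congrArg Prod.fst ih
        have ih2 := congrArg Prod.snd ih
        unfold bSplit at ih1 ih2 ⊢
        rw [hf]
        cases hft : bFindTab t 0 with
        | none =>
          rw [hft] at ih1 ih2
          simp only [Option.map_none]
          simp at ih1 ih2
          simp [hb, ← ih1]
          exact ih2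
        | some j =>
          rw [hft] at ih1 ih2
          simp only [Option.map_some]
          simp at ih1 ih2
          simp [hb, ← ih1, ← ih2]

-- head of the dropWhile part is a TAB
theorem dropWhile_head9 (l : List (Int × Int)) (a : Int × Int) (t : List (Int × Int))
    (hd : l.dropWhile (fun x => x.2 != 9) = a :: t) : a.2 = 9 := by
  induction l generalizing a t with
  | nil => simp at hd
  | cons b l ih =>
    by_cases hb : b.2 = 9
    · have : (b.2 != 9) = false := by simp [hb]
      rw [List.dropWhile_cons, this] at hd
      simp at hd
      rw [← hd.1, hb]
    · have : (b.2 != 9) = true := by simp [hb]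
      rw [List.dropWhile_cons, this] at hd
      exact ih a t hd

-- ---- gGo absorbs a TAB-free prefix ----

theorem gGo_false_pre (pre : List (Int × Int)) (hpre : ∀ x ∈ pre, x.2 ≠ 9)
    (r : List (Int × Int)) : gGo false (pre ++ r) = pre ++ gGo false r := by
  induction pre with
  | nil => rfl
  | cons a t ih =>
    cases a with
    | mk p c =>
      have hc : c ≠ 9 := hpre (p, c) (by simp)
      simp [gGo, hc]
      exact ih (fun x hx => hpre x (by simp [hx]))

theorem gGo_true_pre (pre : List (Int × Int)) (hpre : ∀ x ∈ pre, x.2 ≠ 9)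
    (r : List (Int × Int)) : gGo true (pre ++ r) = gGo true r := by
  induction pre with
  | nil => rfl
  | cons a t ih =>
    cases a with
    | mk p c =>
      have hc : c ≠ 9 := hpre (p, c) (by simp)
      simp [gGo, hc]
      exact ih (fun x hx => hpre x (by simp [hx]))

-- gGo true = drop through the closing TAB then continue unskipped
theorem gGo_true_split (l : List (Int × Int)) :
    gGo true l = gGo false ((bSplit l).2.drop 1) := by
  rw [bSplit_eq]
  have hsplit : l = l.takeWhile (fun x => x.2 != 9) ++ l.dropWhile (fun x => x.2 != 9) :=
    (List.takeWhile_append_dropWhile).symm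
  have hpre : ∀ x ∈ l.takeWhile (fun x => x.2 != 9), x.2 ≠ 9 := by
    intro x hx
    have := List.mem_takeWhile_imp hx
    simpa using this
  conv_lhs => rw [hsplit]
  rw [gGo_true_pre _ hpre]
  cases hd : l.dropWhile (fun x => x.2 != 9) with
  | nil => rfl
  | cons a t =>
    have h9 : a.2 = 9 := dropWhile_head9 l a t hd
    cases a with
    | mk p c =>
      simp at h9
      simp [gGo, h9]

-- the bLoop condition on `after` is exactly gFillAhead
theorem cond_eq_fillAhead (after : List (Int × Int)) :
    (2 ≤ after.length ∧
      (32 ≤ (after.headD (0, 0)).2 ∨ (after.headD (0, 0)).2 = 31) ∧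
      (after.getD 1 (0, 0)).2 = 0) ↔ gFillAhead after = true := by
  match after with
  | [] => simp [gFillAhead]
  | [x] => simp [gFillAhead]
  | a :: b :: t =>
    cases a with
    | mk p1 c1 =>
      cases b with
      | mk p2 c2 =>
        simp [gFillAhead, List.getD]

theorem bLoop_spec (n : Nat) : ∀ rest : List (Int × Int), rest.length ≤ n →
    ∀ result, bLoop result rest = result ++ gGo false rest := by
  induction n with
  | zero =>
    intro rest hlen result
    have : rest = [] := List.eq_nil_of_length_eq_zero (by omega)
    subst this
    rw [bLoop]
    simp [bSplit, bFindTab, gGo]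
  | succ n ih =>
    intro rest hlen result
    have hsplit : rest = rest.takeWhile (fun x => x.2 != 9) ++ rest.dropWhile (fun x => x.2 != 9) :=
      (List.takeWhile_append_dropWhile).symm
    have hpre : ∀ x ∈ rest.takeWhile (fun x => x.2 != 9), x.2 ≠ 9 := by
      intro x hx
      have := List.mem_takeWhile_imp hx
      simpa using this
    have hgg : gGo false rest =
        rest.takeWhile (fun x => x.2 != 9) ++ gGo false (rest.dropWhile (fun x => x.2 != 9)) := by
      conv_lhs => rw [hsplit]
      exact gGo_false_pre _ hpre _
    rw [bLoop, bSplit_eq]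
    cases hd : rest.dropWhile (fun x => x.2 != 9) with
    | nil =>
      rw [hgg, hd]
      simp [gGo]
    | cons a t =>
      have h9 : a.2 = 9 := dropWhile_head9 rest a t hd
      have hlt : t.length < rest.length := by
        have : (rest.dropWhile (fun x => x.2 != 9)).length ≤ rest.length :=
          List.length_dropWhile_le _ _
        rw [hd] at this
        simp at this
        omega
      have hne : (a :: t : List (Int × Int)) ≠ [] := by simp
      rw [dif_neg hne]
      simp only [List.headD_cons, List.tail_cons]
      rw [hgg, hd]
      cases a with
      | mk p c =>
        simp at h9
        subst h9
        by_cases hcond : (2 ≤ t.length ∧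
            (32 ≤ (t.headD (0, 0)).2 ∨ (t.headD (0, 0)).2 = 31) ∧
            (t.getD 1 (0, 0)).2 = 0)
        · rw [if_pos hcond]
          have hfa : gFillAhead t = true := (cond_eq_fillAhead t).mp hcond
          have hrec := ih ((bSplit t).2.drop 1)
            (by
              have h1 := bSplit_snd_len t
              simp only [List.length_drop]
              omega) ((result ++ rest.takeWhile (fun x => x.2 != 9)) ++ [(p, 1), (p, 9)])
          rw [hrec]
          rw [← gGo_true_split t]
          simp [gGo, hfa]
        · rw [if_neg hcond]
          have hfa : gFillAhead t = false := by
            rcases Bool.eq_false_or_eq_true (gFillAhead t) with ht | hf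
            · exact absurd ((cond_eq_fillAhead t).mpr ht) hcond
            · exact hf
          have hrec := ih t (by omega)
            ((result ++ rest.takeWhile (fun x => x.2 != 9)) ++ [(p, 9)])
          rw [hrec]
          simp [gGo, hfa]

-- ===== VERDICT (by name: the statement is the Claim_ definition above) =====
theorem preprocess_tab_fills_py_spec : Claim_equal_preprocess_tab_fills_py := by
  intro chars _
  unfold Spec_preprocess_tab_fills_py preprocess_tab_fills_py preprocess_tab_fills_py_alt
  have hA := (both_invariant chars chars.length 0 (by omega) []).1
  have hB := bLoop_spec chars.length chars (by omega) []
  simp at hA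
  rw [hA, hB]
  simp
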